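-- pv_equiv track=rewrite | github.com/yordanoswuletaw/codefores-solution | B_Equal_Rectangles.py | checkRectangles
-- ===== SOURCE A (Python) =====
-- def checkRectangles(sides, n):
--     area = None
--     left, right = 1, 4 * n - 2
--     while left < right:
--         currArea = sides[left] * sides[right]
--         if area is None:
--             area = currArea
--         if sides[left - 1] != sides[left] or sides[right] != sides[right + 1]:
--             return 'NO'
--         if area != currArea:
--             return 'NO'
--         left += 2
--         right -= 2
--
--     return 'YES'
-- ===== SOURCE B (Python) =====
-- def checkRectangles(sides, n):
--     m = 2 * n
--     pairs = []
--     for i in range(m):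
--         if sides[2 * i] != sides[2 * i + 1]:
--             return 'NO'
--         pairs.append(sides[2 * i])
--     if not pairs:
--         return 'YES'
--     target = pairs[0] * pairs[-1]
--     for k in range(m):
--         if pairs[k] * pairs[m - 1 - k] != target:
--             return 'NO'
--     return 'YES'
-- ===== Notes on version B (the rewrite author's own statement) =====
-- stated objective: alternative
-- what changed: A's single fused two-pointer loop (pair checks at both ends plus a running area comparison) is replaced by a build-then-scan decomposition: one pass validates each adjacent pair and collects the pair values, a second pass checks each symmetric product against pairs[0]*pairs[-1].
import Mathlib
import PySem

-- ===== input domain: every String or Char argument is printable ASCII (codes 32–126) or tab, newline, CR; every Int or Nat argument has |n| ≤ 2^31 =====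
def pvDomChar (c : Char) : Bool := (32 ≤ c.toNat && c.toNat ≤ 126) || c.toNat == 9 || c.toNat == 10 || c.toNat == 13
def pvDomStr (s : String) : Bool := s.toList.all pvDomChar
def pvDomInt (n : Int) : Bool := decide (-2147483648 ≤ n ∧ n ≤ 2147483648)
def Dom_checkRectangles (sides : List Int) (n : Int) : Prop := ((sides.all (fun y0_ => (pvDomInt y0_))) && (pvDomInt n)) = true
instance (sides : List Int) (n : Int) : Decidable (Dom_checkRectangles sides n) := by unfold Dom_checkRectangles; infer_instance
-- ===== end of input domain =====

-- B replaces A's fused two-pointer pass by a build-pair-table-then-paired-scan decomposition (alternative, same cost).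
-- Python subscript sides[i] on an in-range index (all indices here are nonnegative); getD 0 is only reached outside Pre_.
def pvG (sides : List Int) (i : Int) : Int := (PySem.List.pyGet? sides i).getD 0

-- ===== PORT A =====
-- fuel = (right - left).toNat bounds the iteration count of the while loop; it only makes the
-- recursion structural and is never exhausted while the loop guard holds.
def chkLoopA (sides : List Int) : Nat → Option Int → Int → Int → String
  | 0, _, _, _ => "YES"
  | fuel + 1, area, left, right =>
    if left < right then
      if pvG sides (left - 1) ≠ pvG sides left ∨ pvG sides right ≠ pvG sides (right + 1) then "NO"
      else if area.getD (pvG sides left * pvG sides right) ≠ pvG sides left * pvG sides right then "NO"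
      else chkLoopA sides fuel (some (area.getD (pvG sides left * pvG sides right))) (left + 2) (right - 2)
    else "YES"

def checkRectangles (sides : List Int) (n : Int) : String :=
  chkLoopA sides (4 * n - 2 - 1).toNat none 1 (4 * n - 2)

-- ===== PORT B =====
-- fuel = (m - i).toNat / (m - k).toNat makes each for-loop structural; it matches the trip count.
def chkBuild (sides : List Int) : Nat → Int → Int → List Int → Option (List Int)
  | 0, _, _, acc => some acc
  | fuel + 1, m, i, acc =>
    if i < m then
      if pvG sides (2 * i) ≠ pvG sides (2 * i + 1) then none
      else chkBuild sides fuel m (i + 1) (acc ++ [pvG sides (2 * i)])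
    else some acc

def chkScan (pairs : List Int) : Nat → Int → Int → Int → String
  | 0, _, _, _ => "YES"
  | fuel + 1, target, m, k =>
    if k < m then
      if pvG pairs k * pvG pairs (m - 1 - k) ≠ target then "NO"
      else chkScan pairs fuel target m (k + 1)
    else "YES"

def checkRectangles_alt (sides : List Int) (n : Int) : String :=
  match chkBuild sides (2 * n).toNat (2 * n) 0 [] with
  | none => "NO"
  | some pairs =>
    if pairs = [] then "YES"
    else chkScan pairs (2 * n).toNat (pvG pairs 0 * pvG pairs (-1)) (2 * n) 0

-- ===== PRECONDITION & SPEC =====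
-- Pre_ is exactly the set of inputs on which the Python A returns (elsewhere it raises IndexError):
-- n ≤ 0 (empty loop), or the list holds all 4n accessed entries, or it is one short but the very first
-- pair comparison already fails, which A answers before touching the missing index sides[4n-1].
def Pre_checkRectangles (sides : List Int) (n : Int) : Prop :=
  n ≤ 0 ∨ 4 * n ≤ sides.length ∨ (sides.length + 1 = 4 * n ∧ pvG sides 0 ≠ pvG sides 1)
instance (sides : List Int) (n : Int) : Decidable (Pre_checkRectangles sides n) := by unfold Pre_checkRectangles; infer_instance
def pvWitness_checkRectangles : List Int × Int := ([2, 2, 3, 3], 1)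

def Spec_checkRectangles (sides : List Int) (n : Int) (out : String) : Prop := out = checkRectangles_alt sides n
instance (sides : List Int) (n : Int) (out : String) : Decidable (Spec_checkRectangles sides n out) := by unfold Spec_checkRectangles; infer_instance

-- ===== CLAIM (what is proved, stated in full; the proofs are below) =====
def Claim_equal_checkRectangles : Prop := ∀ (sides : List Int) (n : Int), Dom_checkRectangles sides n → Pre_checkRectangles sides n → Spec_checkRectangles sides n (checkRectangles sides n)

-- ===== LEMMAS AND PROOFS =====

-- Every run of A's loop answers "YES" or "NO".
theorem chkLoopA_mem (sides : List Int) (fuel : Nat) (area : Option Int) (left right : Int) :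
    chkLoopA sides fuel area left right = "YES" ∨ chkLoopA sides fuel area left right = "NO" := by
  fun_induction chkLoopA <;> simp_all

-- Characterisation of A's loop from a state with the area already fixed.
theorem chkLoopA_yes (sides : List Int) (t fuel : Nat) (a left right : Int)
    (h : right - left = 4 * (t : Int) - 3) (hf : t ≤ fuel) :
    (chkLoopA sides fuel (some a) left right = "YES" ↔
      ∀ k : Nat, k < t →
        pvG sides (left - 1 + 2 * k) = pvG sides (left + 2 * k) ∧
        pvG sides (right - 2 * k) = pvG sides (right + 1 - 2 * k) ∧
        a = pvG sides (left + 2 * k) * pvG sides (right - 2 * k)) := by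
  induction t generalizing fuel left right with
  | zero =>
    cases fuel with
    | zero => simp [chkLoopA]
    | succ f =>
      rw [chkLoopA, if_neg (by omega)]
      simp
  | succ t ih =>
    cases fuel with
    | zero => exact absurd hf (by omega)
    | succ f =>
      rw [chkLoopA, if_pos (by omega)]
      by_cases hp : pvG sides (left - 1) = pvG sides left ∧ pvG sides right = pvG sides (right + 1)
      · rw [if_neg (by push Not; exact hp)]
        by_cases ha : a = pvG sides left * pvG sides right
        · rw [if_neg (by simpa using ha)]
          simp only [Option.getD_some]
          rw [ih f (left + 2) (right - 2) (by omega) (by omega)]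
          constructor
          · intro hall j hj
            rcases j with _ | j
            · simp only [Nat.cast_zero, mul_zero, add_zero, sub_zero]
              exact ⟨hp.1, hp.2, ha⟩
            · have := hall j (by omega)
              push_cast at this ⊢
              ring_nf at this ⊢
              exact this
          · intro hall j hj
            have := hall (j + 1) (by omega)
            push_cast at this ⊢
            ring_nf at this ⊢
            exact this
        · rw [if_pos (by simpa using ha)]
          constructor
          · intro hy; exact absurd hy (by simp)
          · intro hall
            have := (hall 0 (by omega)).2.2
            simp only [Nat.cast_zero, mul_zero, add_zero, sub_zero] at this
            exact absurd this ha
      · rw [if_pos (by tauto)]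
        constructor
        · intro hy; exact absurd hy (by simp)
        · intro hall
          have := hall 0 (by omega)
          simp only [Nat.cast_zero, mul_zero, add_zero, sub_zero] at this
          exact absurd ⟨this.1, this.2.1⟩ hp

-- B's first pass succeeds and collects the pair values when every adjacent pair agrees …
theorem chkBuild_some (sides : List Int) (t fuel : Nat) (m i : Int) (acc : List Int)
    (h : m - i = (t : Int)) (hf : t ≤ fuel)
    (hp : ∀ k : Nat, k < t → pvG sides (2 * (i + k)) = pvG sides (2 * (i + k) + 1)) :
    chkBuild sides fuel m i acc =
      some (acc ++ (List.range t).map (fun (k : Nat) => pvG sides (2 * (i + (k : Int))))) := by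
  induction t generalizing fuel i acc with
  | zero =>
    cases fuel with
    | zero => simp [chkBuild]
    | succ f =>
      rw [chkBuild, if_neg (by omega)]
      simp
  | succ t ih =>
    cases fuel with
    | zero => exact absurd hf (by omega)
    | succ f =>
      rw [chkBuild, if_pos (by omega)]
      have h0 := hp 0 (by omega)
      simp only [Nat.cast_zero, add_zero] at h0
      rw [if_neg (by simpa using h0)]
      have hp' : ∀ k : Nat, k < t → pvG sides (2 * (i + 1 + k)) = pvG sides (2 * (i + 1 + k) + 1) := by
        intro k hk
        have := hp (k + 1) (by omega)
        push_cast at this ⊢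
        ring_nf at this ⊢
        exact this
      rw [ih f (i + 1) (acc ++ [pvG sides (2 * i)]) (by omega) (by omega) hp']
      have hlist : (List.range (t + 1)).map (fun (k : Nat) => pvG sides (2 * (i + (k : Int)))) =
          pvG sides (2 * i) :: (List.range t).map (fun (k : Nat) => pvG sides (2 * (i + 1 + (k : Int)))) := by
        rw [List.range_succ_eq_map, List.map_cons, List.map_map]
        congr 1
        · simp
        · refine List.map_congr_left ?_
          intro k _
          simp only [Function.comp_apply]
          congr 1
          push_cast
          ring
      rw [hlist]
      simp

-- … and fails as soon as some pair disagrees.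
theorem chkBuild_none (sides : List Int) (t fuel : Nat) (m i : Int) (acc : List Int)
    (h : m - i = (t : Int)) (hf : t ≤ fuel)
    (hp : ¬ ∀ k : Nat, k < t → pvG sides (2 * (i + k)) = pvG sides (2 * (i + k) + 1)) :
    chkBuild sides fuel m i acc = none := by
  induction t generalizing fuel i acc with
  | zero => exact absurd (fun k hk => absurd hk (by omega)) hp
  | succ t ih =>
    cases fuel with
    | zero => exact absurd hf (by omega)
    | succ f =>
      rw [chkBuild, if_pos (by omega)]
      by_cases h0 : pvG sides (2 * i) = pvG sides (2 * i + 1)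
      · rw [if_neg (by simpa using h0)]
        refine ih f (i + 1) _ (by omega) (by omega) ?_
        intro hall
        refine hp ?_
        intro k hk
        rcases k with _ | j
        · simpa using h0
        · have := hall j (by omega)
          push_cast at this ⊢
          ring_nf at this ⊢
          exact this
      · rw [if_pos (by simpa using h0)]

theorem chkScan_mem (pairs : List Int) (fuel : Nat) (target m k : Int) :
    chkScan pairs fuel target m k = "YES" ∨ chkScan pairs fuel target m k = "NO" := by
  fun_induction chkScan <;> simp_all

theorem chkScan_yes (pairs : List Int) (t fuel : Nat) (target m k : Int)
    (h : m - k = (t : Int)) (hf : t ≤ fuel) :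
    (chkScan pairs fuel target m k = "YES" ↔
      ∀ j : Nat, j < t →
        pvG pairs (k + j) * pvG pairs (m - 1 - (k + j)) = target) := by
  induction t generalizing fuel k with
  | zero =>
    cases fuel with
    | zero => simp [chkScan]
    | succ f =>
      rw [chkScan, if_neg (by omega)]
      simp
  | succ t ih =>
    cases fuel with
    | zero => exact absurd hf (by omega)
    | succ f =>
      rw [chkScan, if_pos (by omega)]
      by_cases h0 : pvG pairs k * pvG pairs (m - 1 - k) = target
      · rw [if_neg (by simpa using h0), ih f (k + 1) (by omega) (by omega)]
        constructor
        · intro hall j hj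
          rcases j with _ | j
          · simpa using h0
          · have := hall j (by omega)
            push_cast at this ⊢
            ring_nf at this ⊢
            exact this
        · intro hall j hj
          have := hall (j + 1) (by omega)
          push_cast at this ⊢
          ring_nf at this ⊢
          exact this
      · rw [if_pos (by simpa using h0)]
        constructor
        · intro hy; exact absurd hy (by simp)
        · intro hall
          exact absurd (by simpa using hall 0 (by omega)) h0

-- The two loop conditions coincide.
theorem cond_bridge (sides : List Int) (N : Nat) (hN : 1 ≤ N) :
    ((∀ k : Nat, k < N →
        pvG sides (2 * (k : Int)) = pvG sides (2 * (k : Int) + 1) ∧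
        pvG sides (4 * (N : Int) - 2 - 2 * k) = pvG sides (4 * (N : Int) - 1 - 2 * k) ∧
        pvG sides 1 * pvG sides (4 * (N : Int) - 2) = pvG sides (2 * (k : Int) + 1) * pvG sides (4 * (N : Int) - 2 - 2 * k))
      ↔
     ((∀ k : Nat, k < 2 * N → pvG sides (2 * (k : Int)) = pvG sides (2 * (k : Int) + 1)) ∧
      (∀ k : Nat, k < 2 * N →
        pvG sides (2 * (k : Int)) * pvG sides (2 * (2 * (N : Int) - 1 - k)) =
          pvG sides 0 * pvG sides (2 * (2 * (N : Int) - 1))))) := by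
  constructor
  · intro hA
    have hpair : ∀ k : Nat, k < 2 * N → pvG sides (2 * (k : Int)) = pvG sides (2 * (k : Int) + 1) := by
      intro k hk
      by_cases hkN : k < N
      · exact (hA k hkN).1
      · have h2 := (hA (2 * N - 1 - k) (by omega)).2.1
        have e1 : 4 * (N : Int) - 2 - 2 * ((2 * N - 1 - k : Nat) : Int) = 2 * (k : Int) := by omega
        have e2 : 4 * (N : Int) - 1 - 2 * ((2 * N - 1 - k : Nat) : Int) = 2 * (k : Int) + 1 := by omega
        rw [e1, e2] at h2
        exact h2
    refine ⟨hpair, ?_⟩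
    have g01 : pvG sides 0 = pvG sides 1 := by simpa using hpair 0 (by omega)
    have key : ∀ k : Nat, k < N →
        pvG sides (2 * (k : Int)) * pvG sides (2 * (2 * (N : Int) - 1 - k)) =
          pvG sides 0 * pvG sides (2 * (2 * (N : Int) - 1)) := by
      intro k hk
      have h3 := (hA k hk).2.2
      have h1 := (hA k hk).1
      have e3 : 4 * (N : Int) - 2 - 2 * (k : Int) = 2 * (2 * (N : Int) - 1 - k) := by ring
      have e4 : 4 * (N : Int) - 2 = 2 * (2 * (N : Int) - 1) := by ring
      rw [e3, e4, ← h1, ← g01] at h3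
      exact h3.symm
    intro k hk
    by_cases hkN : k < N
    · exact key k hkN
    · have hk' := key (2 * N - 1 - k) (by omega)
      have e5 : ((2 * N - 1 - k : Nat) : Int) = 2 * (N : Int) - 1 - (k : Int) := by omega
      rw [e5] at hk'
      have e6 : 2 * (N : Int) - 1 - (2 * (N : Int) - 1 - (k : Int)) = (k : Int) := by ring
      rw [e6] at hk'
      calc pvG sides (2 * (k : Int)) * pvG sides (2 * (2 * (N : Int) - 1 - k))
          = pvG sides (2 * (2 * (N : Int) - 1 - (k : Int))) * pvG sides (2 * (k : Int)) := by ring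
        _ = _ := hk'
  · rintro ⟨hp, hq⟩
    intro k hk
    have g01 : pvG sides 0 = pvG sides 1 := by simpa using hp 0 (by omega)
    refine ⟨hp k (by omega), ?_, ?_⟩
    · have h2 := hp (2 * N - 1 - k) (by omega)
      have e1 : 2 * ((2 * N - 1 - k : Nat) : Int) = 4 * (N : Int) - 2 - 2 * (k : Int) := by omega
      rw [e1] at h2
      have e2 : 4 * (N : Int) - 2 - 2 * (k : Int) + 1 = 4 * (N : Int) - 1 - 2 * (k : Int) := by ring
      rw [e2] at h2
      exact h2
    · have hqk := hq k (by omega)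
      have e3 : 2 * (2 * (N : Int) - 1 - (k : Int)) = 4 * (N : Int) - 2 - 2 * (k : Int) := by ring
      have e4 : 2 * (2 * (N : Int) - 1) = 4 * (N : Int) - 2 := by ring
      rw [e3, e4] at hqk
      rw [← g01, ← hp k (by omega)]
      exact hqk.symm

theorem ports_eq_pos (sides : List Int) (N : Nat) (hN : 1 ≤ N) :
    checkRectangles sides (N : Int) = checkRectangles_alt sides (N : Int) := by
  have hA : chkLoopA sides (4 * (N : Int) - 2 - 1).toNat none 1 (4 * (N : Int) - 2) = "YES" ↔
      (∀ k : Nat, k < N →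
        pvG sides (2 * (k : Int)) = pvG sides (2 * (k : Int) + 1) ∧
        pvG sides (4 * (N : Int) - 2 - 2 * k) = pvG sides (4 * (N : Int) - 1 - 2 * k) ∧
        pvG sides 1 * pvG sides (4 * (N : Int) - 2) = pvG sides (2 * (k : Int) + 1) * pvG sides (4 * (N : Int) - 2 - 2 * k)) := by
    rw [show (4 * (N : Int) - 2 - 1).toNat = (4 * (N : Int) - 2 - 1).toNat - 1 + 1 from by omega]
    rw [chkLoopA, if_pos (by omega)]
    by_cases hp : pvG sides (1 - 1) = pvG sides 1 ∧ pvG sides (4 * (N : Int) - 2) = pvG sides (4 * (N : Int) - 2 + 1)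
    · have hpa : pvG sides 0 = pvG sides 1 := by
        have := hp.1; norm_num at this; exact this
      have hpb : pvG sides (4 * (N : Int) - 2) = pvG sides (4 * (N : Int) - 1) := by
        have := hp.2
        rw [show 4 * (N : Int) - 2 + 1 = 4 * (N : Int) - 1 from by ring] at this
        exact this
      rw [if_neg (by push Not; exact hp)]
      rw [if_neg (by simp)]
      simp only [Option.getD_none]
      rw [chkLoopA_yes sides (N - 1) ((4 * (N : Int) - 2 - 1).toNat - 1) _ (1 + 2) (4 * (N : Int) - 2 - 2) (by omega) (by omega)]
      constructor
      · intro hall k hk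
        rcases k with _ | j
        · refine ⟨by simpa using hpa, ?_, ?_⟩
          · simpa using hpb
          · norm_num
        · have := hall j (by omega)
          push_cast at this ⊢
          ring_nf at this ⊢
          exact this
      · intro hall j hj
        have := hall (j + 1) (by omega)
        push_cast at this ⊢
        ring_nf at this ⊢
        exact this
    · rw [if_pos (by by_contra hc; push Not at hc; exact hp ⟨hc.1, hc.2⟩)]
      constructor
      · intro hy; exact absurd hy (by simp)
      · intro hall
        have h1 := (hall 0 (by omega)).1
        have h2 := (hall 0 (by omega)).2.1
        refine (hp ⟨by simpa using h1, ?_⟩).elim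
        rw [show 4 * (N : Int) - 2 + 1 = 4 * (N : Int) - 1 from by ring]
        simpa using h2
  rw [checkRectangles, checkRectangles_alt]
  by_cases hpair : ∀ k : Nat, k < 2 * N → pvG sides (2 * (k : Int)) = pvG sides (2 * (k : Int) + 1)
  · have hbuild := chkBuild_some sides (2 * N) (2 * (N : Int)).toNat (2 * (N : Int)) 0 []
      (by omega) (by omega) (by intro k hk; simpa using hpair k hk)
    have hPl : ([] : List Int) ++ (List.range (2 * N)).map (fun (k : Nat) => pvG sides (2 * ((0 : Int) + (k : Int)))) =
        (List.range (2 * N)).map (fun (k : Nat) => pvG sides (2 * (k : Int))) := by simp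
    rw [hPl] at hbuild
    rw [hbuild]
    set Pl : List Int := (List.range (2 * N)).map (fun (k : Nat) => pvG sides (2 * (k : Int))) with hPldef
    have hlen : Pl.length = 2 * N := by simp [hPldef]
    have hne : Pl ≠ [] := by
      intro hcon
      rw [hcon] at hlen
      simp at hlen
      omega
    show chkLoopA sides (4 * (N : Int) - 2 - 1).toNat none 1 (4 * (N : Int) - 2) =
      if Pl = [] then "YES" else chkScan Pl (2 * (N : Int)).toNat (pvG Pl 0 * pvG Pl (-1)) (2 * (N : Int)) 0
    rw [if_neg hne]
    have hPj : ∀ j : Nat, j < 2 * N → pvG Pl (j : Int) = pvG sides (2 * (j : Int)) := by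
      intro j hj
      rw [pvG, PySem.List.pyGet?_natCast]
      rw [List.getElem?_eq_getElem (by omega)]
      simp [hPldef]
    have hP0 : pvG Pl 0 = pvG sides 0 := by
      have := hPj 0 (by omega)
      simpa using this
    have hPlast : pvG Pl (-1) = pvG sides (2 * (2 * (N : Int) - 1)) := by
      rw [pvG, PySem.List.pyGet?_neg_one, List.getLast?_eq_getElem?,
        List.getElem?_eq_getElem (by simp; omega)]
      simp only [Option.getD_some]
      simp only [hPldef, List.getElem_map, List.getElem_range, List.length_map,
        List.length_range]
      congr 1
      omega
    have hPneg : ∀ j : Nat, j < 2 * N →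
        pvG Pl (2 * (N : Int) - 1 - (j : Int)) = pvG sides (2 * (2 * (N : Int) - 1 - (j : Int))) := by
      intro j hj
      have e : 2 * (N : Int) - 1 - (j : Int) = ((2 * N - 1 - j : Nat) : Int) := by omega
      rw [e, hPj (2 * N - 1 - j) (by omega)]
    have hscan := chkScan_yes Pl (2 * N) (2 * (N : Int)).toNat (pvG Pl 0 * pvG Pl (-1)) (2 * (N : Int)) 0 (by omega) (by omega)
    have hBiff : chkScan Pl (2 * (N : Int)).toNat (pvG Pl 0 * pvG Pl (-1)) (2 * (N : Int)) 0 = "YES" ↔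
        (∀ k : Nat, k < 2 * N →
          pvG sides (2 * (k : Int)) * pvG sides (2 * (2 * (N : Int) - 1 - k)) =
            pvG sides 0 * pvG sides (2 * (2 * (N : Int) - 1))) := by
      rw [hscan]
      constructor
      · intro hh j hj
        have := hh j hj
        simp only [zero_add] at this
        rw [hPj j hj, hPneg j hj, hP0, hPlast] at this
        exact this
      · intro hh j hj
        have := hh j hj
        simp only [zero_add]
        rw [hPj j hj, hPneg j hj, hP0, hPlast]
        exact this
    have hAiff : chkLoopA sides (4 * (N : Int) - 2 - 1).toNat none 1 (4 * (N : Int) - 2) = "YES" ↔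
        (∀ k : Nat, k < 2 * N →
          pvG sides (2 * (k : Int)) * pvG sides (2 * (2 * (N : Int) - 1 - k)) =
            pvG sides 0 * pvG sides (2 * (2 * (N : Int) - 1))) := by
      rw [hA, cond_bridge sides N hN]
      exact ⟨fun h => h.2, fun h => ⟨hpair, h⟩⟩
    rcases chkLoopA_mem sides (4 * (N : Int) - 2 - 1).toNat none 1 (4 * (N : Int) - 2) with h1 | h1 <;>
      rcases chkScan_mem Pl (2 * (N : Int)).toNat (pvG Pl 0 * pvG Pl (-1)) (2 * (N : Int)) 0 with h2 | h2
    · rw [h1, h2]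
    · exact absurd (hBiff.mpr (hAiff.mp h1)) (by rw [h2]; simp)
    · exact absurd (hAiff.mpr (hBiff.mp h2)) (by rw [h1]; simp)
    · rw [h1, h2]
  · have hbuild := chkBuild_none sides (2 * N) (2 * (N : Int)).toNat (2 * (N : Int)) 0 []
      (by omega) (by omega) (by intro hall; exact hpair (fun k hk => by simpa using hall k hk))
    rw [hbuild]
    have hAno : chkLoopA sides (4 * (N : Int) - 2 - 1).toNat none 1 (4 * (N : Int) - 2) ≠ "YES" := by
      intro hy
      exact hpair ((cond_bridge sides N hN).mp (hA.mp hy)).1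
    rcases chkLoopA_mem sides (4 * (N : Int) - 2 - 1).toNat none 1 (4 * (N : Int) - 2) with h1 | h1
    · exact absurd h1 hAno
    · rw [h1]

theorem ports_eq (sides : List Int) (n : Int) :
    checkRectangles sides n = checkRectangles_alt sides n := by
  by_cases hn : n ≤ 0
  · rw [checkRectangles, checkRectangles_alt,
      show (4 * n - 2 - 1).toNat = 0 from by omega,
      show (2 * n).toNat = 0 from by omega]
    simp [chkLoopA, chkBuild]
  · have hn' : ((n.toNat : Int)) = n := by omega
    have := ports_eq_pos sides n.toNat (by omega)
    rw [hn'] at this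
    exact this

-- ===== VERDICT (by name: the statement is the Claim_ definition above) =====
theorem checkRectangles_spec : Claim_equal_checkRectangles := by
  intro sides n _ _
  exact ports_eq sides n
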